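-- pv_equiv track=rewrite | github.com/DrBlackZJU/RNAret | ssp2dot.py | generate_dot_bracket
-- ===== SOURCE A (Python) =====
-- def generate_dot_bracket(seq_raw, pred):
--     n = len(seq_raw)
--     dot_bracket = ['.' for _ in range(n)]
--
--     for i in range(n):
--         for j in range(i,n):
--             if pred[i][j] >= 1:
--                 dot_bracket[i] = '('
--                 dot_bracket[j] = ')'
--
--
--     return ''.join(dot_bracket)
-- ===== SOURCE B (Python) =====
-- def generate_dot_bracket(seq_raw, pred):
--     n = len(seq_raw)
--     chars = []
--     for k in range(n):
--         if any(pred[k][j] >= 1 for j in range(k + 1, n)):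
--             chars.append('(')
--         elif any(pred[i][k] >= 1 for i in range(k + 1)):
--             chars.append(')')
--         else:
--             chars.append('.')
--     return ''.join(chars)
-- ===== Notes on version B (the rewrite author's own statement) =====
-- stated objective: simpler
-- what changed: B computes each position's final character directly (open if any pred[k][j]>=1 with j>k, else close if any pred[i][k]>=1 with i<=k, else '.') instead of A's mutate-and-overwrite of a shared buffer under two nested write loops.
import Mathlib
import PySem

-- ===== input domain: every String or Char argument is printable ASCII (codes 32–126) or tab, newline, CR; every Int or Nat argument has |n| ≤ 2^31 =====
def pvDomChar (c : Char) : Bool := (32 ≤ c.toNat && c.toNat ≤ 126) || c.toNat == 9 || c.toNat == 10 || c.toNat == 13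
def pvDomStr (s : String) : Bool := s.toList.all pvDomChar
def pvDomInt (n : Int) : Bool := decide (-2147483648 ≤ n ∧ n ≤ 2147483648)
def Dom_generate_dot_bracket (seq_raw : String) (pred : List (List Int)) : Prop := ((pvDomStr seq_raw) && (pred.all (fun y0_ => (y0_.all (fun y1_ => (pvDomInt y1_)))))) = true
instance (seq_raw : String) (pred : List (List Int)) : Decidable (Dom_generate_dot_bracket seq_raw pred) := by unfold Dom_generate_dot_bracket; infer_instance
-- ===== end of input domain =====

-- B computes each position's final character directly (row-suffix ⇒ '(', else column-prefix ⇒ ')', else '.')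
-- instead of A's overwriting of a shared buffer: simpler decomposition, same O(n^2) cost.

-- ===== PORT A =====
-- literal port of A: buffer of '.' of length n, nested loops i ∈ [0,n), j ∈ [i,n),
-- on pred[i][j] ≥ 1 write '(' at i then ')' at j (indices are in range under Pre_, so getD is exact)
def generate_dot_bracket (seq_raw : String) (pred : List (List Int)) : String :=
  let n := seq_raw.toList.length
  let dot := (List.range n).foldl (fun db i =>
      (List.range' i (n - i)).foldl (fun db j =>
        if (pred.getD i []).getD j 0 ≥ 1 then (db.set i '(').set j ')' else db) db)
    (List.replicate n '.')
  String.ofList dot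

-- ===== PORT B =====
def generate_dot_bracket_alt (seq_raw : String) (pred : List (List Int)) : String :=
  let n := seq_raw.toList.length
  String.ofList ((List.range n).map (fun k =>
    if (List.range' (k + 1) (n - (k + 1))).any (fun j => decide ((pred.getD k []).getD j 0 ≥ 1)) then '('
    else if (List.range (k + 1)).any (fun i => decide ((pred.getD i []).getD k 0 ≥ 1)) then ')'
    else '.'))

-- ===== PRECONDITION & SPEC =====
-- Pre_ excludes exactly the inputs on which Python A raises IndexError:
-- pred must have at least n rows and each of the first n rows at least n entries.
def Pre_generate_dot_bracket (seq_raw : String) (pred : List (List Int)) : Prop :=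
  seq_raw.toList.length ≤ pred.length ∧
  ∀ row ∈ pred.take seq_raw.toList.length, seq_raw.toList.length ≤ row.length
instance (seq_raw : String) (pred : List (List Int)) : Decidable (Pre_generate_dot_bracket seq_raw pred) := by
  unfold Pre_generate_dot_bracket; infer_instance
def pvWitness_generate_dot_bracket : String × List (List Int) := ("ab", [[0, 1], [0, 0]])

def Spec_generate_dot_bracket (seq_raw : String) (pred : List (List Int)) (out : String) : Prop := out = generate_dot_bracket_alt seq_raw pred
instance (seq_raw : String) (pred : List (List Int)) (out : String) : Decidable (Spec_generate_dot_bracket seq_raw pred out) := by unfold Spec_generate_dot_bracket; infer_instance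

-- ===== CLAIM (what is proved, stated in full; the proofs are below) =====
def Claim_equal_generate_dot_bracket : Prop := ∀ (seq_raw : String) (pred : List (List Int)), Dom_generate_dot_bracket seq_raw pred → Pre_generate_dot_bracket seq_raw pred → Spec_generate_dot_bracket seq_raw pred (generate_dot_bracket seq_raw pred)

-- ===== LEMMAS AND PROOFS =====

-- The final character B assigns to position k (p i j abstracts 'pred[i][j] ≥ 1').
def pvFinal (p : Nat → Nat → Bool) (n k : Nat) : Char :=
  if (List.range' (k + 1) (n - (k + 1))).any (p k) then '('
  else if (List.range (k + 1)).any (fun i => p i k) then ')'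
  else '.'

-- 'some i < m has p i k': what the column-prefix scan up to m sees.
def pvClose (p : Nat → Nat → Bool) (m k : Nat) : Bool := (List.range m).any (fun i => p i k)

-- buffer contents after A's outer loop has processed i = 0 .. m-1
def pvInv (p : Nat → Nat → Bool) (n m k : Nat) : Char :=
  if k < m then pvFinal p n k else if pvClose p m k then ')' else '.'

-- buffer contents while A's inner loop at row m has processed j = m .. t-1
def pvInn (p : Nat → Nat → Bool) (n m t k : Nat) : Char :=
  if k < m then pvFinal p n k
  else if k = m then
    (if (List.range' (m + 1) (t - (m + 1))).any (p m) then '('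
     else if pvClose p (min (m + 1) t) m then ')' else '.')
  else if k < t then (if pvClose p (m + 1) k then ')' else '.')
  else (if pvClose p m k then ')' else '.')

theorem pvInn_start (p : Nat → Nat → Bool) (n m : Nat) :
    pvInn p n m m = pvInv p n m := by
  funext k
  unfold pvInn pvInv
  rcases Nat.lt_trichotomy k m with h | h | h
  · simp [h]
  · subst h
    simp
  · simp [Nat.lt_asymm h, Nat.ne_of_gt h]

theorem pvInn_end (p : Nat → Nat → Bool) (n m k : Nat) (hk : k < n) :
    pvInn p n m n k = pvInv p n (m + 1) k := by
  unfold pvInn pvInv pvFinal pvClose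
  rcases Nat.lt_trichotomy k m with h | h | h
  · simp [h, Nat.lt_succ_of_lt h]
  · subst h
    simp [Nat.min_eq_left (Nat.succ_le_of_lt hk)]
  · simp [Nat.lt_asymm h, Nat.ne_of_gt h, hk, Nat.not_le_of_lt h]

theorem pv_any_succ (p : Nat → Nat → Bool) (m t : Nat) (h : m < t) :
    (List.range' (m + 1) (t + 1 - (m + 1))).any (p m)
      = ((List.range' (m + 1) (t - (m + 1))).any (p m) || p m t) := by
  have e1 : t + 1 - (m + 1) = (t - (m + 1)) + 1 := by omega
  rw [e1, List.range'_concat]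
  have e3 : m + 1 + (t - (m + 1)) = t := by omega
  simp [e3]

theorem pvClose_succ (p : Nat → Nat → Bool) (m k : Nat) :
    pvClose p (m + 1) k = (pvClose p m k || p m k) := by
  unfold pvClose
  simp [List.range_succ]

theorem pvClose_mem (p : Nat → Nat → Bool) (m k i : Nat) (h : i < m) (hp : p i k = true) :
    pvClose p m k = true :=
  List.any_eq_true.mpr ⟨i, List.mem_range.mpr h, hp⟩

-- positions other than m and t are untouched by the inner step
theorem pvInn_point_other (p : Nat → Nat → Bool) (n m t k : Nat) (_hm : m ≤ t)
    (hkm : k ≠ m) (hkt : k ≠ t) : pvInn p n m t k = pvInn p n m (t + 1) k := by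
  unfold pvInn
  rcases Nat.lt_trichotomy k m with h | h | h
  · simp [h]
  · exact absurd h hkm
  · rw [if_neg (Nat.lt_asymm h), if_neg hkm, if_neg (Nat.lt_asymm h), if_neg hkm]
    rcases Nat.lt_trichotomy k t with h2 | h2 | h2
    · simp [h2, Nat.lt_succ_of_lt h2]
    · exact absurd h2 hkt
    · rw [if_neg (by omega : ¬ k < t), if_neg (by omega : ¬ k < t + 1)]

theorem pvInn_point_false (p : Nat → Nat → Bool) (n m t k : Nat) (hm : m ≤ t)
    (hp : p m t = false) : pvInn p n m t k = pvInn p n m (t + 1) k := by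
  by_cases hkm : k = m
  · subst hkm
    unfold pvInn
    rcases Nat.eq_or_lt_of_le hm with h2 | h2
    · subst h2
      simp [pvClose_succ, hp]
    · rw [if_neg (Nat.lt_irrefl k), if_pos rfl, if_neg (Nat.lt_irrefl k), if_pos rfl,
        pv_any_succ p k t h2, hp, Bool.or_false, (by omega : min (k + 1) t = min (k + 1) (t + 1))]

  · by_cases hkt : k = t
    · subst hkt
      have h2 : m < k := by omega
      unfold pvInn
      rw [if_neg (Nat.lt_asymm h2), if_neg (by omega : ¬ k = m),
          if_neg (Nat.lt_asymm h2), if_neg (by omega : ¬ k = m),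
          if_neg (Nat.lt_irrefl k), if_pos (Nat.lt_succ_self k), pvClose_succ, hp]
      simp
    · exact pvInn_point_other p n m t k hm hkm hkt

theorem pvInn_point_true (p : Nat → Nat → Bool) (n m t k : Nat) (hm : m ≤ t)
    (hp : p m t = true) :
    (if t = k then ')' else if m = k then '(' else pvInn p n m t k)
      = pvInn p n m (t + 1) k := by
  by_cases hkt : t = k
  · rw [if_pos hkt]
    unfold pvInn
    rw [if_neg (by omega : ¬ k < m)]
    by_cases hkm : k = m
    · have hpm : p m m = true := by
        rw [show t = m by omega] at hp
        exact hp
      rw [if_pos hkm, (by omega : t + 1 - (m + 1) = 0), (by omega : min (m + 1) (t + 1) = m + 1),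
        pvClose_succ, hpm]
      simp
    · have hkm' : m < k := by omega
      rw [if_neg hkm, if_pos (by omega : k < t + 1),
        pvClose_mem p (m + 1) k m (Nat.lt_succ_self m) (by rw [show k = t by omega] at hkm' ⊢; exact hp)]
      simp
  · rw [if_neg hkt]
    by_cases hkm : m = k
    · subst hkm
      rw [if_pos rfl]
      unfold pvInn
      have h2 : m < t := by omega
      rw [if_neg (Nat.lt_irrefl m), if_pos rfl, pv_any_succ p m t h2, hp]
      simp
    · rw [if_neg hkm]
      exact pvInn_point_other p n m t k hm (fun h => hkm h.symm) (fun h => hkt h.symm)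

theorem pvInn_step (p : Nat → Nat → Bool) (n m t : Nat) (hm : m ≤ t) (_ht : t < n) :
    (if p m t then (((List.range n).map (pvInn p n m t)).set m '(').set t ')'
     else (List.range n).map (pvInn p n m t))
      = (List.range n).map (pvInn p n m (t + 1)) := by
  by_cases hp : p m t
  · rw [if_pos hp]
    apply List.ext_getElem
    · simp
    · intro k hk1 hk2
      simp only [List.getElem_set, List.getElem_map, List.getElem_range]
      exact pvInn_point_true p n m t k hm hp
  · rw [if_neg (by simp [hp])]
    exact List.map_congr_left fun k _ => pvInn_point_false p n m t k hm (by simpa using hp)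

-- the whole inner loop of row m, from column t on
theorem pvInner_aux (p : Nat → Nat → Bool) (n m : Nat) (_hm : m < n) :
    ∀ (c t : Nat), m ≤ t → t + c = n →
    (List.range' t c).foldl
        (fun db j => if p m j then (db.set m '(').set j ')' else db)
        ((List.range n).map (pvInn p n m t))
      = (List.range n).map (pvInn p n m n) := by
  intro c
  induction c with
  | zero => intro t _ h; simp [← h]
  | succ c ih =>
    intro t hmt h
    rw [List.range'_succ, List.foldl_cons]
    have := pvInn_step p n m t hmt (by omega)
    rw [this]
    exact ih (t + 1) (by omega) (by omega)

theorem pvInner (p : Nat → Nat → Bool) (n m : Nat) (hm : m < n) :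
    (List.range' m (n - m)).foldl
        (fun db j => if p m j then (db.set m '(').set j ')' else db)
        ((List.range n).map (pvInv p n m))
      = (List.range n).map (pvInv p n (m + 1)) := by
  rw [← pvInn_start]
  rw [pvInner_aux p n m hm (n - m) m (Nat.le_refl m) (by omega)]
  exact List.map_congr_left fun k hk => pvInn_end p n m k (List.mem_range.mp hk)

theorem pvOuter_aux (p : Nat → Nat → Bool) (n : Nat) :
    ∀ (c m : Nat), m + c = n →
    (List.range' m c).foldl
        (fun db i => (List.range' i (n - i)).foldl
          (fun db j => if p i j then (db.set i '(').set j ')' else db) db)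
        ((List.range n).map (pvInv p n m))
      = (List.range n).map (pvInv p n n) := by
  intro c
  induction c with
  | zero => intro m h; simp [← h]
  | succ c ih =>
    intro m h
    rw [List.range'_succ, List.foldl_cons, pvInner p n m (by omega)]
    exact ih (m + 1) (by omega)

-- A's whole loop nest computes exactly B's per-position characters
theorem pvLoop (p : Nat → Nat → Bool) (n : Nat) :
    (List.range n).foldl
        (fun db i => (List.range' i (n - i)).foldl
          (fun db j => if p i j then (db.set i '(').set j ')' else db) db)
        (List.replicate n '.')
      = (List.range n).map (pvFinal p n) := by
  have h0 : List.replicate n '.' = (List.range n).map (pvInv p n 0) := by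
    apply List.ext_getElem
    · simp
    · intro k h1 h2
      simp [pvInv, pvClose]
  have hr : List.range n = List.range' 0 n := by
    simpa using (List.range_eq_range' (n := n))
  rw [h0]
  rw [congrArg (List.foldl
        (fun db i => (List.range' i (n - i)).foldl
          (fun db j => if p i j then (db.set i '(').set j ')' else db) db)
        ((List.range n).map (pvInv p n 0))) hr]
  rw [pvOuter_aux p n n 0 (by omega)]
  exact List.map_congr_left fun k hk => by
    simp [pvInv, List.mem_range.mp hk]

-- ===== VERDICT (by name: the statement is the Claim_ definition above) =====
theorem generate_dot_bracket_spec : Claim_equal_generate_dot_bracket := by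
  intro seq_raw pred _ _
  unfold Spec_generate_dot_bracket
  simp only [generate_dot_bracket, generate_dot_bracket_alt]
  have h := pvLoop (fun i j => decide ((pred.getD i []).getD j 0 ≥ 1)) seq_raw.toList.length
  simp only [decide_eq_true_eq] at h
  rw [h]
  rfl
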